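-- pv_equiv track=rewrite | github.com/Mr-Perfectuz/adventofcode_2024 | Day19/task2.py | count_ways_to_form_design
-- ===== SOURCE A (Python) =====
-- def count_ways_to_form_design(design, patterns):
--
--     dp = [0] * (len(design) + 1)
--     dp[0] = 1
--
--
--     for i in range(len(design)):
--         if dp[i] > 0:
--             for pattern in patterns:
--
--                 if design[i:i + len(pattern)] == pattern:
--                     dp[i + len(pattern)] += dp[i]
--
--
--     return dp[len(design)]
-- ===== SOURCE B (Python) =====
-- def count_ways_to_form_design(design, patterns):
--     # Count distinct patterns once, with multiplicities.
--     bag = {}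
--     for p in patterns:
--         bag[p] = bag.get(p, 0) + 1
--     n = len(design)
--     # ways[i] = number of tilings of the suffix design[i:]; filled right to left.
--     ways = {n: 1}
--     for i in range(n - 1, -1, -1):
--         ways[i] = sum(c * ways[i + len(p)] for p, c in bag.items()
--                       if design.startswith(p, i))
--     return ways[0]
-- ===== Notes on version B (the rewrite author's own statement) =====
-- stated objective: alternative
-- what changed: A fills an array of prefix counts left-to-right, pushing dp[i] forward through every raw pattern by slice comparison; B first collapses the pattern list into a dict of distinct patterns with multiplicities, then fills a dict of SUFFIX counts right-to-left, pulling c*ways[i+len(p)] via startswith - a different recurrence (suffix tilings, not prefix tilings) whose agreement with A is itself a theorem, and duplicate patterns are matched once (a measured constant-factor speedup on duplicate-heavy lists).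
-- outside the precondition, e.g. on count_ways_to_form_design('ab', ['', 'a', 'b']): A returns 4, B raises KeyError
import Mathlib
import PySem

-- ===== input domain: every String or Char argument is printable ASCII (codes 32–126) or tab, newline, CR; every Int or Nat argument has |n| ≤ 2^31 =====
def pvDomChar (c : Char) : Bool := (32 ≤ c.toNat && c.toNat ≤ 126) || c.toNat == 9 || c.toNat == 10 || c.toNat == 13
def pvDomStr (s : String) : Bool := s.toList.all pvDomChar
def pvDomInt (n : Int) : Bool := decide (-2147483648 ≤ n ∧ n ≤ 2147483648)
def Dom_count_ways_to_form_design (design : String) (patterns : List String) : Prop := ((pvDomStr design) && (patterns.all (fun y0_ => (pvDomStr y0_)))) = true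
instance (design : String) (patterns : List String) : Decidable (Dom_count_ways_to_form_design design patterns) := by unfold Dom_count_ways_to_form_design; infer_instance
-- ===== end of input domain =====

-- B replaces A's left-to-right array scatter over prefix counts (push dp[i] forward through every raw
-- pattern by slice comparison) with a right-to-left dict of SUFFIX counts pulled through a bag of
-- distinct patterns with multiplicities; equivalence is about the RETURN value (no argument is mutated).

-- ===== PORT A =====
-- inner loop of A: for pattern in patterns: if design[i:i + len(pattern)] == pattern: dp[i + len(pattern)] += dp[i]
def pvInnerA (dl : List Char) (dp : List Int) (i : Int) (patterns : List String) : List Int :=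
  patterns.foldl (fun dp p =>
    let L : Int := (p.toList.length : Int)
    if PySem.List.slice dl (some i) (some (i + L)) = p.toList then
      PySem.List.pySetD dp (i + L) (PySem.List.pyGetD dp (i + L) 0 + PySem.List.pyGetD dp i 0)
    else dp) dp

-- body of A's outer loop: if dp[i] > 0: <inner loop>
def pvBodyA (dl : List Char) (patterns : List String) (dp : List Int) (i : Int) : List Int :=
  if PySem.List.pyGetD dp i 0 > 0 then pvInnerA dl dp i patterns else dp

def count_ways_to_form_design (design : String) (patterns : List String) : Int :=
  let dl := design.toList
  let n : Nat := dl.length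
  -- dp = [0] * (len(design) + 1); dp[0] = 1
  let dp0 : List Int := PySem.List.pySetD (List.replicate (n + 1) (0 : Int)) 0 1
  -- for i in range(len(design)): ...  (dp indices touched are in range whenever the slice matches)
  let dp := (PySem.List.pyRange 0 (n : Int) 1).foldl (pvBodyA dl patterns) dp0
  PySem.List.pyGetD dp (n : Int) 0

-- ===== PORT B =====
-- bag = {}; for p in patterns: bag[p] = bag.get(p, 0) + 1
def pvBagB (patterns : List String) : PySem.Dict String Int :=
  patterns.foldl (fun d p => PySem.Dict.insert d p (PySem.Dict.getD d p 0 + 1)) PySem.Dict.empty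

-- sum(c * ways[i + len(p)] for p, c in bag.items() if design.startswith(p, i)) — i ≥ 0 along
-- range(n-1, -1, -1), so startswith(p, i) is exactly startswith on design[i:]; under Pre_ the key
-- i + len(p) is present whenever the test fires, so getD 0 is exact there (Python: KeyError outside Pre_)
def pvRowB (dl : List Char) (bag : PySem.Dict String Int) (ways : PySem.Dict Int Int) (i : Int) : Int :=
  (PySem.Dict.items bag).foldl (fun acc pc =>
    if PySem.Chars.startswith (dl.drop i.toNat) pc.1.toList
    then acc + pc.2 * PySem.Dict.getD ways (i + (pc.1.toList.length : Int)) 0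
    else acc) 0

def count_ways_to_form_design_alt (design : String) (patterns : List String) : Int :=
  let dl := design.toList
  let n : Nat := dl.length
  let bag := pvBagB patterns
  -- ways = {n: 1}
  let ways0 : PySem.Dict Int Int := PySem.Dict.insert PySem.Dict.empty (n : Int) 1
  -- for i in range(n - 1, -1, -1): ways[i] = ...
  let ways := (PySem.List.pyRange ((n : Int) - 1) (-1) (-1)).foldl
      (fun w i => PySem.Dict.insert w i (pvRowB dl bag w i)) ways0
  -- return ways[0]
  PySem.Dict.getD ways 0 0

-- ===== PRECONDITION & SPEC =====
-- Pre_ excludes inputs with a nonempty design and the empty string among the patterns: there A still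
-- returns (its in-place scatter doubles dp[i] once per "" occurrence, an order-dependent artefact),
-- while B's right-to-left dict naturally raises KeyError (ways[i] is read before it is written).
def Pre_count_ways_to_form_design (design : String) (patterns : List String) : Prop :=
  "" ∉ patterns ∨ design = ""
instance (design : String) (patterns : List String) : Decidable (Pre_count_ways_to_form_design design patterns) := by unfold Pre_count_ways_to_form_design; infer_instance

def pvWitness_count_ways_to_form_design : String × List String := ("abcab", ["a", "b", "ca", "ab"])

def Spec_count_ways_to_form_design (design : String) (patterns : List String) (out : Int) : Prop := out = count_ways_to_form_design_alt design patterns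
instance (design : String) (patterns : List String) (out : Int) : Decidable (Spec_count_ways_to_form_design design patterns out) := by unfold Spec_count_ways_to_form_design; infer_instance

-- ===== CLAIM (what is proved, stated in full; the proofs are below) =====
def Claim_equal_count_ways_to_form_design : Prop := ∀ (design : String) (patterns : List String), Dom_count_ways_to_form_design design patterns → Pre_count_ways_to_form_design design patterns → Spec_count_ways_to_form_design design patterns (count_ways_to_form_design design patterns)

-- ===== LEMMAS AND PROOFS =====

-- sum of a map that vanishes pointwise
lemma pv_sum_zero {α : Type} {l : List α} {f : α → Int} (h : ∀ x ∈ l, f x = 0) :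
    (l.map f).sum = 0 := by
  apply List.sum_eq_zero
  intro x hx
  obtain ⟨p, hp, rfl⟩ := List.mem_map.mp hx
  exact h p hp

-- ===== common spec, A side (prefix counts, peel the LAST pattern) =====
def pvW (dl : List Char) (ps : List String) : Nat → Int
  | 0 => 1
  | (m+1) =>
    (ps.map (fun p =>
      if h : 0 < p.toList.length ∧ p.toList.length ≤ m + 1 ∧
             (dl.drop (m + 1 - p.toList.length)).take p.toList.length = p.toList
      then pvW dl ps (m + 1 - p.toList.length) else 0)).sum
  termination_by j => j
  decreasing_by omega

lemma pvW_succ (dl : List Char) (ps : List String) (m : Nat) :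
    pvW dl ps (m+1) = (ps.map (fun p =>
      if 0 < p.toList.length ∧ p.toList.length ≤ m + 1 ∧
             (dl.drop (m + 1 - p.toList.length)).take p.toList.length = p.toList
      then pvW dl ps (m + 1 - p.toList.length) else 0)).sum := by
  conv_lhs => rw [pvW]
  exact congrArg List.sum (List.map_congr_left (fun p _ => dite_eq_ite ..))

lemma pvW_nonneg (dl : List Char) (ps : List String) : ∀ j, 0 ≤ pvW dl ps j := by
  intro j
  induction j using Nat.strong_induction_on with
  | _ j ih =>
    match j with
    | 0 => simp [pvW]
    | m+1 =>
      rw [pvW_succ]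
      apply List.sum_nonneg
      intro x hx
      simp only [List.mem_map] at hx
      obtain ⟨p, _, rfl⟩ := hx
      split
      · next h => exact ih _ (by omega)
      · exact le_refl 0

-- a matching pattern fits inside the string
lemma pv_match_len {dl : List Char} {p : String} {i : Nat} (hL : 0 < p.toList.length)
    (h : (dl.drop i).take p.toList.length = p.toList) : i + p.toList.length ≤ dl.length := by
  have := congrArg List.length h
  simp only [List.length_take, List.length_drop] at this
  omega

-- contribution of scatter position i to cell j
def pvC (dl : List Char) (ps : List String) (i j : Nat) : Int :=
  (ps.map (fun p =>
    if (dl.drop i).take p.toList.length = p.toList ∧ i + p.toList.length = j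
    then pvW dl ps i else 0)).sum

-- A's dp cell j after the outer loop has processed positions 0..k-1
def pvD (dl : List Char) (ps : List String) (k j : Nat) : Int :=
  (if j = 0 then 1 else 0) + ∑ i ∈ Finset.range k, pvC dl ps i j

lemma pvC_zero_of_ge (dl : List Char) (ps : List String)
    (HP : ∀ p ∈ ps, 0 < p.toList.length) {i j : Nat} (h : j ≤ i) : pvC dl ps i j = 0 := by
  apply List.sum_eq_zero
  intro x hx
  simp only [List.mem_map] at hx
  obtain ⟨p, hp, rfl⟩ := hx
  rw [if_neg]
  rintro ⟨-, h2⟩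
  have := HP p hp
  omega

lemma pv_sum_swap (ps : List String) (k : Nat) (f : Nat → String → Int) :
    ∑ i ∈ Finset.range k, (ps.map (f i)).sum = (ps.map (fun p => ∑ i ∈ Finset.range k, f i p)).sum := by
  induction ps with
  | nil => simp
  | cons p t ih => simp [List.sum_cons, Finset.sum_add_distrib, ih]

lemma pv_sum_collapse (dl : List Char) (k j L : Nat) (hL : 0 < L) (hjk : j ≤ k)
    (P : List Char) (W : Nat → Int) :
    (∑ i ∈ Finset.range k, if ((dl.drop i).take L = P ∧ i + L = j) then W i else 0)
    = if (L ≤ j ∧ (dl.drop (j - L)).take L = P) then W (j - L) else 0 := by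
  by_cases hLj : L ≤ j
  · have hterm : ∀ i, (if ((dl.drop i).take L = P ∧ i + L = j) then W i else 0)
        = if i = j - L then (if (dl.drop (j - L)).take L = P then W (j - L) else 0) else 0 := by
      intro i
      by_cases hi : i = j - L
      · subst hi
        have hij : (j - L) + L = j := by omega
        simp [hij]
      · rw [if_neg (by rintro ⟨-, h2⟩; omega), if_neg hi]
    rw [Finset.sum_congr rfl (fun i _ => hterm i), Finset.sum_ite_eq' (Finset.range k) (j - L)]
    have hb : j - L ∈ Finset.range k := Finset.mem_range.mpr (by omega)
    simp [hb, hLj]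
  · have hterm : ∀ i ∈ Finset.range k, (if ((dl.drop i).take L = P ∧ i + L = j) then W i else 0) = 0 := by
      intro i _
      rw [if_neg (by rintro ⟨-, h2⟩; omega)]
    rw [Finset.sum_congr rfl hterm]
    simp [hLj]

lemma pvD_eq_pvW (dl : List Char) (ps : List String)
    (HP : ∀ p ∈ ps, 0 < p.toList.length) :
    ∀ j k, j ≤ k → pvD dl ps k j = pvW dl ps j := by
  intro j k hjk
  have hcut : pvD dl ps k j = pvD dl ps j j := by
    unfold pvD
    congr 1
    symm
    apply Finset.sum_subset (Finset.range_subset_range.mpr hjk)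
    intro i _ hi
    exact pvC_zero_of_ge dl ps HP (by simpa using hi)
  rw [hcut]
  match j with
  | 0 => simp [pvD, pvW]
  | m+1 =>
    unfold pvD pvC
    rw [pv_sum_swap, pvW_succ]
    rw [if_neg (Nat.succ_ne_zero m), zero_add]
    apply congrArg List.sum
    apply List.map_congr_left
    intro p hp
    have hL := HP p hp
    rw [pv_sum_collapse dl (m+1) (m+1) p.toList.length hL (le_refl _)]
    by_cases hc : p.toList.length ≤ m + 1 ∧ (dl.drop (m + 1 - p.toList.length)).take p.toList.length = p.toList
    · rw [if_pos hc, if_pos ⟨hL, hc.1, hc.2⟩]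
    · rw [if_neg hc, if_neg (fun hcon => hc ⟨hcon.2.1, hcon.2.2⟩)]

lemma pv_getD_set (l : List Int) (i j : Nat) (v d : Int) (hi : i < l.length) :
    (l.set i v).getD j d = if j = i then v else l.getD j d := by
  rcases Nat.lt_or_ge j l.length with h | h
  · simp [List.getD, h]
    split <;> simp_all [eq_comm]
  · have hji : j ≠ i := by omega
    simp [h, hji, List.length_set]

-- ===== A side: the scatter fold =====
def pvDp0 (n : Nat) : List Int := (List.replicate (n + 1) (0 : Int)).set 0 1

def pvA (dl : List Char) (ps : List String) (k : Nat) : List Int :=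
  (PySem.List.pyRange 0 (k : Int) 1).foldl (pvBodyA dl ps) (pvDp0 dl.length)

lemma pvA_succ (dl : List Char) (ps : List String) (k : Nat) :
    pvA dl ps (k+1) = pvBodyA dl ps (pvA dl ps k) (k : Int) := by
  unfold pvA
  rw [show ((k+1 : Nat) : Int) = (k : Int) + 1 from by push_cast; ring]
  rw [PySem.List.pyRange_one_succ_right (by omega), List.foldl_append]
  rfl

lemma pvInnerA_spec (dl : List Char) (qs : List String)
    (HQ : ∀ p ∈ qs, 0 < p.toList.length) (k : Nat) :
    ∀ dp : List Int, dp.length = dl.length + 1 →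
    (pvInnerA dl dp (k : Int) qs).length = dp.length ∧
    ∀ j : Nat, (pvInnerA dl dp (k : Int) qs).getD j 0
      = dp.getD j 0 + (qs.map (fun p =>
          if (dl.drop k).take p.toList.length = p.toList ∧ k + p.toList.length = j
          then dp.getD k 0 else 0)).sum := by
  induction qs with
  | nil => intro dp _; constructor <;> simp [pvInnerA]
  | cons p qs ih =>
    intro dp hdp
    have hL : 0 < p.toList.length := HQ p (by simp)
    have hqs : ∀ q ∈ qs, 0 < q.toList.length := fun q hq => HQ q (by simp [hq])
    have hsl : PySem.List.slice dl (some (k : Int)) (some ((k : Int) + (p.toList.length : Int)))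
        = (dl.drop k).take p.toList.length := by
      rw [show (k : Int) + (p.toList.length : Int) = ((k + p.toList.length : Nat) : Int) from by
        push_cast; ring]
      exact PySem.List.slice_natCast_add dl k p.toList.length
    have hstep : pvInnerA dl dp (k : Int) (p :: qs)
        = pvInnerA dl (if PySem.List.slice dl (some (k : Int))
              (some ((k : Int) + (p.toList.length : Int))) = p.toList
            then PySem.List.pySetD dp ((k : Int) + (p.toList.length : Int))
              (PySem.List.pyGetD dp ((k : Int) + (p.toList.length : Int)) 0
                + PySem.List.pyGetD dp (k : Int) 0)
            else dp) (k : Int) qs := rfl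
    by_cases hm : (dl.drop k).take p.toList.length = p.toList
    · have hfit : k + p.toList.length ≤ dl.length := pv_match_len hL hm
      have hcast : (k : Int) + (p.toList.length : Int) = ((k + p.toList.length : Nat) : Int) := by
        push_cast; ring
      have hset : (if PySem.List.slice dl (some (k : Int))
              (some ((k : Int) + (p.toList.length : Int))) = p.toList
            then PySem.List.pySetD dp ((k : Int) + (p.toList.length : Int))
              (PySem.List.pyGetD dp ((k : Int) + (p.toList.length : Int)) 0
                + PySem.List.pyGetD dp (k : Int) 0)
            else dp)
          = dp.set (k + p.toList.length) (dp.getD (k + p.toList.length) 0 + dp.getD k 0) := by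
        rw [if_pos (hsl.trans hm), hcast, PySem.List.pySetD_natCast,
          PySem.List.pyGetD_natCast, PySem.List.pyGetD_natCast]
      rw [hstep, hset]
      set dp' := dp.set (k + p.toList.length) (dp.getD (k + p.toList.length) 0 + dp.getD k 0) with hdp'
      have hlen' : dp'.length = dp.length := by simp [hdp']
      have hidx : k + p.toList.length < dp.length := by omega
      have hgk : dp'.getD k 0 = dp.getD k 0 := by
        rw [hdp', pv_getD_set dp _ _ _ _ hidx, if_neg (by omega)]
      obtain ⟨ihlen, ihget⟩ := ih hqs dp' (by rw [hlen']; exact hdp)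
      refine ⟨by rw [ihlen, hlen'], fun j => ?_⟩
      rw [ihget j, hgk]
      have hgj : dp'.getD j 0 = dp.getD j 0
          + (if (dl.drop k).take p.toList.length = p.toList ∧ k + p.toList.length = j
             then dp.getD k 0 else 0) := by
        rw [hdp', pv_getD_set dp _ _ _ _ hidx]
        by_cases hj : j = k + p.toList.length
        · rw [if_pos hj, if_pos ⟨hm, hj.symm⟩, hj]
        · rw [if_neg hj, if_neg (by rintro ⟨-, h2⟩; exact hj h2.symm), add_zero]
      rw [hgj]
      simp only [List.map_cons, List.sum_cons]
      ring
    · have hne : pvInnerA dl dp (k : Int) (p :: qs) = pvInnerA dl dp (k : Int) qs := by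
        rw [hstep, if_neg (fun h => hm (hsl ▸ h))]
      obtain ⟨ihlen, ihget⟩ := ih hqs dp hdp
      refine ⟨by rw [hne, ihlen], fun j => ?_⟩
      rw [hne, ihget j]
      simp only [List.map_cons, List.sum_cons]
      rw [if_neg (fun h => hm h.1)]
      ring

lemma pvA_spec (dl : List Char) (ps : List String)
    (HP : ∀ p ∈ ps, 0 < p.toList.length) :
    ∀ k, k ≤ dl.length →
      (pvA dl ps k).length = dl.length + 1 ∧
      ∀ j : Nat, (pvA dl ps k).getD j 0 = pvD dl ps k j := by
  intro k
  induction k with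
  | zero =>
    intro _
    have h0 : pvA dl ps 0 = pvDp0 dl.length := by
      unfold pvA
      rw [show ((0 : Nat) : Int) = 0 from rfl, PySem.List.pyRange_one_eq_nil (by norm_num)]
      rfl
    have hlen : (pvDp0 dl.length).length = dl.length + 1 := by simp [pvDp0]
    refine ⟨by rw [h0, hlen], fun j => ?_⟩
    rw [h0]
    unfold pvDp0 pvD
    rw [pv_getD_set _ _ _ _ _ (by simp)]
    rcases Nat.lt_or_ge j (dl.length + 1) with h | h
    · simp [List.getD, h]
    · have : j ≠ 0 := by omega
      simp [this]
  | succ k ih =>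
    intro hk
    obtain ⟨hlen, hget⟩ := ih (by omega)
    have hguard : PySem.List.pyGetD (pvA dl ps k) (k : Int) 0 = pvW dl ps k := by
      rw [PySem.List.pyGetD_natCast]
      rw [hget k, pvD_eq_pvW dl ps HP k k le_rfl]
    rw [pvA_succ]
    unfold pvBodyA
    rw [hguard]
    by_cases hpos : pvW dl ps k > 0
    · rw [if_pos hpos]
      obtain ⟨ilen, iget⟩ := pvInnerA_spec dl ps HP k (pvA dl ps k) hlen
      refine ⟨by rw [ilen, hlen], fun j => ?_⟩
      rw [iget j, hget j]
      simp only [hget, pvD_eq_pvW dl ps HP k k le_rfl]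
      show pvD dl ps k j + _ = pvD dl ps (k+1) j
      unfold pvD
      rw [Finset.sum_range_succ]
      show _ = _ + (_ + pvC dl ps k j)
      unfold pvC
      ring
    · rw [if_neg hpos]
      have hW0 : pvW dl ps k = 0 :=
        le_antisymm (by omega) (pvW_nonneg dl ps k)
      have hC0 : ∀ j, pvC dl ps k j = 0 := by
        intro j
        apply List.sum_eq_zero
        intro x hx
        simp only [List.mem_map] at hx
        obtain ⟨p, hp, rfl⟩ := hx
        rw [hW0]; split <;> rfl
      refine ⟨hlen, fun j => ?_⟩
      rw [hget j]
      unfold pvD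
      rw [Finset.sum_range_succ, hC0 j, add_zero]

lemma pv_bridge_A (design : String) (patterns : List String) :
    count_ways_to_form_design design patterns
      = PySem.List.pyGetD (pvA design.toList patterns design.toList.length)
          ((design.toList.length : Nat) : Int) 0 := by
  show PySem.List.pyGetD
      ((PySem.List.pyRange 0 (design.toList.length : Int) 1).foldl
        (pvBodyA design.toList patterns)
        (PySem.List.pySetD (List.replicate (design.toList.length + 1) (0 : Int)) 0 1))
      ((design.toList.length : Int)) 0 = _
  have h0 := PySem.List.pySetD_of_nonneg (List.replicate (design.toList.length + 1) (0 : Int))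
    (i := 0) 1 (by norm_num)
  rw [h0, Int.toNat_zero]
  rfl

-- ===== B side spec: suffix counts (peel the FIRST pattern) =====
def pvF (ps : List String) : List Char → Int
  | [] => 1
  | c :: rest =>
    (ps.map (fun p =>
      if _h : 0 < p.toList.length ∧ (c :: rest).take p.toList.length = p.toList
      then pvF ps ((c :: rest).drop p.toList.length) else 0)).sum
  termination_by s => s.length
  decreasing_by simp only [List.length_drop, List.length_cons]; omega

lemma pvF_nil (ps : List String) : pvF ps [] = 1 := by rw [pvF]

lemma pvF_expand (ps : List String) (s : List Char) (hs : s ≠ []) :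
    pvF ps s = (ps.map (fun p =>
      if 0 < p.toList.length ∧ s.take p.toList.length = p.toList
      then pvF ps (s.drop p.toList.length) else 0)).sum := by
  cases s with
  | nil => exact absurd rfl hs
  | cons c rest =>
    rw [pvF]
    exact congrArg List.sum (List.map_congr_left (fun p _ => dite_eq_ite ..))

-- double sums over the pattern list commute
lemma pv_swapL (l1 l2 : List String) (T : String → String → Int) :
    (l1.map (fun p => (l2.map (T p)).sum)).sum
      = (l2.map (fun q => (l1.map (fun p => T p q)).sum)).sum := by
  induction l1 with
  | nil => simp
  | cons a t ih =>
    simp only [List.map_cons, List.sum_cons, ih]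
    rw [← PySem.List.sum_map_add_int]

-- the common refinement: first pattern p, last pattern q, a tiling of the middle
def pvT (ps : List String) (s : List Char) (p q : String) : Int :=
  if 0 < p.toList.length ∧ 0 < q.toList.length ∧ p.toList.length + q.toList.length ≤ s.length
     ∧ s.take p.toList.length = p.toList ∧ s.drop (s.length - q.toList.length) = q.toList
  then pvF ps ((s.drop p.toList.length).take (s.length - p.toList.length - q.toList.length)) else 0

-- peel-last expansion of the peel-first recursion (the heart of the fwd/bwd agreement)
lemma pvF_peel_last (ps : List String) :
    ∀ (N : Nat) (s : List Char), s.length ≤ N → s ≠ [] →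
    pvF ps s = (ps.map (fun q =>
      if 0 < q.toList.length ∧ q.toList.length ≤ s.length ∧ s.drop (s.length - q.toList.length) = q.toList
      then pvF ps (s.take (s.length - q.toList.length)) else 0)).sum := by
  intro N
  induction N with
  | zero =>
    intro s hlen hne
    cases s with
    | nil => exact absurd rfl hne
    | cons a t => simp at hlen
  | succ N ih =>
    intro s hlen hne
    have hsl : 0 < s.length := List.length_pos_iff.mpr hne
    have claimP : ∀ p ∈ ps,
        (if 0 < p.toList.length ∧ s.take p.toList.length = p.toList
         then pvF ps (s.drop p.toList.length) else 0)
        = (if p.toList = s then 1 else 0) + (ps.map (pvT ps s p)).sum := by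
      intro p _
      by_cases hpre : 0 < p.toList.length ∧ s.take p.toList.length = p.toList
      · obtain ⟨hp0, hptake⟩ := hpre
        have hple : p.toList.length ≤ s.length := by
          have := congrArg List.length hptake
          simp only [List.length_take] at this
          omega
        by_cases hfull : p.toList.length = s.length
        · have hps : p.toList = s := by
            rw [← hptake, hfull, List.take_length]
          rw [if_pos ⟨hp0, hptake⟩, if_pos hps]
          have hdrop : s.drop p.toList.length = [] := by
            rw [hfull, List.drop_length]
          rw [hdrop, pvF_nil]
          have hz : (ps.map (pvT ps s p)).sum = 0 := pv_sum_zero (fun q _ => by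
            unfold pvT
            rw [if_neg]
            rintro ⟨_, hq0, hle, _, _⟩
            omega)
          rw [hz, add_zero]
        · have hlt : p.toList.length < s.length := lt_of_le_of_ne hple hfull
          have hps : p.toList ≠ s := fun h => hfull (congrArg List.length h)
          rw [if_pos ⟨hp0, hptake⟩, if_neg hps, zero_add]
          have hdne : s.drop p.toList.length ≠ [] := by
            intro h
            have := congrArg List.length h
            simp only [List.length_drop, List.length_nil] at this
            omega
          have hdlen : (s.drop p.toList.length).length ≤ N := by
            simp only [List.length_drop]
            omega
          rw [ih (s.drop p.toList.length) hdlen hdne]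
          apply congrArg List.sum
          apply List.map_congr_left
          intro q _
          unfold pvT
          simp only [List.length_drop]
          have hcond : (0 < q.toList.length ∧ q.toList.length ≤ s.length - p.toList.length ∧
              (s.drop p.toList.length).drop (s.length - p.toList.length - q.toList.length) = q.toList)
              ↔ (0 < p.toList.length ∧ 0 < q.toList.length ∧
                 p.toList.length + q.toList.length ≤ s.length ∧
                 s.take p.toList.length = p.toList ∧
                 s.drop (s.length - q.toList.length) = q.toList) := by
            constructor
            · rintro ⟨h1, h2, h3⟩
              refine ⟨hp0, h1, by omega, hptake, ?_⟩
              rw [List.drop_drop] at h3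
              rw [show s.length - q.toList.length
                  = p.toList.length + (s.length - p.toList.length - q.toList.length) from by omega]
              exact h3
            · rintro ⟨_, h1, h2, _, h3⟩
              refine ⟨h1, by omega, ?_⟩
              rw [List.drop_drop,
                show p.toList.length + (s.length - p.toList.length - q.toList.length)
                  = s.length - q.toList.length from by omega]
              exact h3
          exact if_congr hcond rfl rfl
      · rw [if_neg hpre]
        have hps : p.toList ≠ s := by
          intro h
          apply hpre
          constructor
          · rw [h]; exact hsl
          · rw [h, List.take_length]
        rw [if_neg hps, zero_add]
        symm
        apply pv_sum_zero
        intro q _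
        unfold pvT
        rw [if_neg]
        rintro ⟨h1, _, _, h4, _⟩
        exact hpre ⟨h1, h4⟩
    have claimQ : ∀ q ∈ ps,
        (if 0 < q.toList.length ∧ q.toList.length ≤ s.length ∧
            s.drop (s.length - q.toList.length) = q.toList
         then pvF ps (s.take (s.length - q.toList.length)) else 0)
        = (if q.toList = s then 1 else 0) + (ps.map (fun p => pvT ps s p q)).sum := by
      intro q _
      by_cases hsuf : 0 < q.toList.length ∧ q.toList.length ≤ s.length ∧
          s.drop (s.length - q.toList.length) = q.toList
      · obtain ⟨hq0, hqle, hqdrop⟩ := hsuf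
        by_cases hfull : q.toList.length = s.length
        · have h0 : s.length - q.toList.length = 0 := by omega
          have hqs : q.toList = s := by
            rw [← hqdrop, h0, List.drop_zero]
          rw [if_pos ⟨hq0, hqle, hqdrop⟩, if_pos hqs, h0, List.take_zero, pvF_nil]
          have hz : (ps.map (fun p => pvT ps s p q)).sum = 0 := pv_sum_zero (fun p _ => by
            unfold pvT
            rw [if_neg]
            rintro ⟨hp0, _, hle, _, _⟩
            omega)
          rw [hz, add_zero]
        · have hlt : q.toList.length < s.length := lt_of_le_of_ne hqle hfull
          have hqs : q.toList ≠ s := fun h => hfull (congrArg List.length h)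
          rw [if_pos ⟨hq0, hqle, hqdrop⟩, if_neg hqs, zero_add]
          have htne : s.take (s.length - q.toList.length) ≠ [] := by
            intro h
            have := congrArg List.length h
            simp only [List.length_take, List.length_nil] at this
            omega
          rw [pvF_expand ps _ htne]
          apply congrArg List.sum
          apply List.map_congr_left
          intro p _
          unfold pvT
          have hcond : (0 < p.toList.length ∧
              (s.take (s.length - q.toList.length)).take p.toList.length = p.toList)
              ↔ (0 < p.toList.length ∧ 0 < q.toList.length ∧
                 p.toList.length + q.toList.length ≤ s.length ∧
                 s.take p.toList.length = p.toList ∧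
                 s.drop (s.length - q.toList.length) = q.toList) := by
            constructor
            · rintro ⟨hp0, htk⟩
              have hplen : p.toList.length ≤ s.length - q.toList.length := by
                have := congrArg List.length htk
                simp only [List.length_take] at this
                omega
              refine ⟨hp0, hq0, by omega, ?_, hqdrop⟩
              rw [List.take_take,
                show min p.toList.length (s.length - q.toList.length) = p.toList.length
                  from by omega] at htk
              exact htk
            · rintro ⟨hp0, _, hle, htk, _⟩
              refine ⟨hp0, ?_⟩
              rw [List.take_take, show min p.toList.length (s.length - q.toList.length)
                  = p.toList.length from by omega]
              exact htk
          have hval : (s.take (s.length - q.toList.length)).drop p.toList.length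
              = (s.drop p.toList.length).take (s.length - p.toList.length - q.toList.length) := by
            rw [List.drop_take]
            congr 1
            omega
          rw [hval]
          exact if_congr hcond rfl rfl
      · rw [if_neg hsuf]
        have hqs : q.toList ≠ s := by
          intro h
          apply hsuf
          refine ⟨by rw [h]; exact hsl, by rw [h], ?_⟩
          rw [h, Nat.sub_self, List.drop_zero]
        rw [if_neg hqs, zero_add]
        symm
        apply pv_sum_zero
        intro p _
        unfold pvT
        rw [if_neg]
        rintro ⟨_, h2, h3, _, h5⟩
        exact hsuf ⟨h2, by omega, h5⟩
    rw [pvF_expand ps s hne, List.map_congr_left claimP, List.map_congr_left claimQ,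
      PySem.List.sum_map_add_int, PySem.List.sum_map_add_int]
    congr 1
    exact pv_swapL ps ps (pvT ps s)

-- prefix counts ARE the suffix recursion on the prefix (A's table vs B's table)
lemma pvW_eq_pvF (dl : List Char) (ps : List String) :
    ∀ j, j ≤ dl.length → pvW dl ps j = pvF ps (dl.take j) := by
  intro j
  induction j using Nat.strong_induction_on with
  | _ j ih =>
    intro hj
    match j with
    | 0 => rw [List.take_zero, pvF_nil]; simp [pvW]
    | m+1 =>
      rw [pvW_succ]
      have hlen : (dl.take (m+1)).length = m + 1 := by
        simp only [List.length_take]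
        omega
      have hne : dl.take (m+1) ≠ [] := by
        intro h
        rw [h] at hlen
        simp at hlen
      rw [pvF_peel_last ps (dl.take (m+1)).length (dl.take (m+1)) le_rfl hne, hlen]
      apply congrArg List.sum
      apply List.map_congr_left
      intro q _
      have htake : (dl.take (m+1)).take (m+1 - q.toList.length) = dl.take (m+1 - q.toList.length) := by
        rw [List.take_take]
        congr 1
        omega
      rw [htake]
      have hcond : (0 < q.toList.length ∧ q.toList.length ≤ m+1 ∧
          (dl.drop (m + 1 - q.toList.length)).take q.toList.length = q.toList)
          ↔ (0 < q.toList.length ∧ q.toList.length ≤ m+1 ∧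
          (dl.take (m+1)).drop (m + 1 - q.toList.length) = q.toList) := by
        have hdrop : ∀ (hq : q.toList.length ≤ m+1),
            (dl.take (m+1)).drop (m + 1 - q.toList.length)
              = (dl.drop (m + 1 - q.toList.length)).take q.toList.length := by
          intro hq
          rw [List.drop_take]
          congr 1
          omega
        constructor
        · rintro ⟨h1, h2, h3⟩
          exact ⟨h1, h2, by rw [hdrop h2]; exact h3⟩
        · rintro ⟨h1, h2, h3⟩
          exact ⟨h1, h2, by rw [← hdrop h2]; exact h3⟩
      by_cases hc : 0 < q.toList.length ∧ q.toList.length ≤ m+1 ∧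
          (dl.drop (m + 1 - q.toList.length)).take q.toList.length = q.toList
      · rw [if_pos hc, if_pos (hcond.mp hc), ih (m + 1 - q.toList.length) (by omega) (by omega)]
      · rw [if_neg hc, if_neg (fun h => hc (hcond.mpr h))]

-- summing v over the single occurrence of x in a nodup list
lemma pv_ite_single (x : String) (v : Int) :
    ∀ (s : List String), s.Nodup → x ∈ s →
    (s.map (fun q => if q = x then v else 0)).sum = v := by
  intro s
  induction s with
  | nil => intro _ h; cases h
  | cons a t ih =>
    intro hnd hmem
    obtain ⟨hat, htnd⟩ := List.nodup_cons.mp hnd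
    simp only [List.map_cons, List.sum_cons]
    rcases List.mem_cons.mp hmem with h | h
    · rw [if_pos h.symm]
      have hz : (t.map (fun q => if q = x then v else 0)).sum = 0 := pv_sum_zero (fun q hq => by
        rw [if_neg]
        intro hqx
        exact hat (by rwa [hqx, h] at hq))
      rw [hz, add_zero]
    · have hax : a ≠ x := fun he => hat (he ▸ h)
      rw [if_neg hax, zero_add]
      exact ih htnd h

-- a sum over the bag of distinct patterns with multiplicities is the sum over the raw list
lemma pv_counter_sum (ps : List String) (g : String → Int) :
    ((PySem.Set.ofList ps).map (fun q => (ps.count q : Int) * g q)).sum = (ps.map g).sum := by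
  induction ps using List.reverseRecOn with
  | nil => simp
  | append_singleton xs x ih =>
    have hone : ∀ q : String, ([x].count q : Int) = if q = x then 1 else 0 := by
      intro q
      by_cases hqx : q = x
      · subst hqx; simp
      · simp [hqx, Ne.symm hqx]
    rw [PySem.Set.ofList_append_singleton, List.map_append, List.sum_append,
      List.map_singleton, List.sum_singleton]
    by_cases hx : x ∈ PySem.Set.ofList xs
    · rw [PySem.Set.add_of_mem hx]
      have hstep : ∀ q ∈ PySem.Set.ofList xs,
          ((xs ++ [x]).count q : Int) * g q
            = (xs.count q : Int) * g q + (if q = x then g x else 0) := by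
        intro q _
        rw [List.count_append]
        push_cast
        rw [hone q]
        by_cases hqx : q = x
        · subst hqx; rw [if_pos rfl, if_pos rfl]; ring
        · rw [if_neg hqx, if_neg hqx]; ring
      rw [List.map_congr_left hstep, PySem.List.sum_map_add_int, ih,
        pv_ite_single x (g x) _ (PySem.Set.nodup_ofList xs) hx]
    · rw [PySem.Set.add_of_not_mem hx]
      have hxxs : x ∉ xs := fun h => hx ((PySem.Set.mem_ofList xs x).mpr h)
      have hstep : ∀ q ∈ PySem.Set.ofList xs,
          ((xs ++ [x]).count q : Int) * g q = (xs.count q : Int) * g q := by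
        intro q hq
        have hqx : q ≠ x := fun he => hxxs (he ▸ (PySem.Set.mem_ofList xs q).mp hq)
        rw [List.count_append]
        push_cast
        rw [hone q, if_neg hqx]
        ring
      rw [List.map_append, List.sum_append, List.map_singleton, List.sum_singleton,
        List.map_congr_left hstep, ih, List.count_append,
        List.count_eq_zero_of_not_mem hxxs]
      simp

-- one row of B equals the suffix count at k, given the table is correct above k
lemma pvRowB_eq (dl : List Char) (ps : List String)
    (HP : ∀ p ∈ ps, 0 < p.toList.length)
    (w : PySem.Dict Int Int) (k : Nat) (hk : k < dl.length)
    (hw : ∀ j : Nat, k < j → j ≤ dl.length → PySem.Dict.getD w (j : Int) 0 = pvF ps (dl.drop j)) :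
    pvRowB dl (pvBagB ps) w (k : Int) = pvF ps (dl.drop k) := by
  have hbag : pvBagB ps = PySem.Dict.counter ps :=
    PySem.Dict.foldl_insert_getD_add_one_eq_counter ps
  unfold pvRowB
  rw [hbag, PySem.Dict.items_counter, List.foldl_map]
  dsimp only
  have hfun : ∀ (acc : Int) (q : String), q ∈ PySem.Set.ofList ps →
      (if PySem.Chars.startswith (dl.drop (k : Int).toNat) q.toList
       then acc + (ps.count q : Int) * PySem.Dict.getD w ((k : Int) + (q.toList.length : Int)) 0
       else acc)
      = acc + (ps.count q : Int) *
          (if 0 < q.toList.length ∧ (dl.drop k).take q.toList.length = q.toList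
           then pvF ps (dl.drop (k + q.toList.length)) else 0) := by
    intro acc q hq
    have hq0 : 0 < q.toList.length := HP q ((PySem.Set.mem_ofList ps q).mp hq)
    have htn : ((k : Int)).toNat = k := Int.toNat_natCast k
    rw [htn]
    by_cases hm : PySem.Chars.startswith (dl.drop k) q.toList
    · have hpref : q.toList <+: dl.drop k := (PySem.Chars.startswith_iff _ _).mp hm
      have htk : (dl.drop k).take q.toList.length = q.toList := (List.prefix_iff_eq_take.mp hpref).symm
      have hfit : k + q.toList.length ≤ dl.length := pv_match_len hq0 htk
      have hcast : (k : Int) + (q.toList.length : Int) = ((k + q.toList.length : Nat) : Int) := by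
        push_cast; ring
      rw [if_pos hm, hcast, hw (k + q.toList.length) (by omega) hfit,
        if_pos ⟨hq0, htk⟩]
    · have htk : ¬ ((dl.drop k).take q.toList.length = q.toList) := by
        intro h
        exact hm (((PySem.Chars.startswith_iff _ _).mpr (List.prefix_iff_eq_take.mpr h.symm)))
      rw [if_neg hm, if_neg (fun hc => htk hc.2), mul_zero, add_zero]
  rw [PySem.List.foldl_congr_mem _ _ _ _ hfun, PySem.List.foldl_add, zero_add, pv_counter_sum]
  have hne : dl.drop k ≠ [] := by
    intro h
    have := congrArg List.length h
    simp only [List.length_drop, List.length_nil] at this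
    omega
  rw [pvF_expand ps (dl.drop k) hne]
  apply congrArg List.sum
  apply List.map_congr_left
  intro p _
  rw [List.drop_drop]

-- descending fold of B keeps the whole table correct
lemma pvDescent (dl : List Char) (ps : List String)
    (HP : ∀ p ∈ ps, 0 < p.toList.length) :
    ∀ (k : Nat), k ≤ dl.length → ∀ w : PySem.Dict Int Int,
      (∀ j : Nat, k ≤ j → j ≤ dl.length → PySem.Dict.getD w (j : Int) 0 = pvF ps (dl.drop j)) →
      ∀ j : Nat, j ≤ dl.length →
        PySem.Dict.getD ((PySem.List.pyRange ((k : Int) - 1) (-1) (-1)).foldl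
          (fun w i => PySem.Dict.insert w i (pvRowB dl (pvBagB ps) w i)) w) (j : Int) 0
        = pvF ps (dl.drop j) := by
  intro k
  induction k with
  | zero =>
    intro _ w hw j hj
    rw [show ((0 : Nat) : Int) - 1 = -1 from by norm_num,
      PySem.List.pyRange_neg_one_eq_nil (by norm_num), List.foldl_nil]
    exact hw j (Nat.zero_le j) hj
  | succ k ih =>
    intro hk w hw j hj
    have hcons : PySem.List.pyRange (((k+1 : Nat) : Int) - 1) (-1) (-1)
        = (k : Int) :: PySem.List.pyRange ((k : Int) - 1) (-1) (-1) := by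
      rw [show (((k+1 : Nat) : Int) - 1) = (k : Int) from by push_cast; ring]
      exact PySem.List.pyRange_neg_one_cons (by omega)
    rw [hcons, List.foldl_cons]
    apply ih (by omega) _ _ j hj
    intro j' hj1 hj2
    by_cases hjk : j' = k
    · subst hjk
      rw [PySem.Dict.getD_insert_self]
      exact pvRowB_eq dl ps HP w j' (by omega) (fun j2 h1 h2 => hw j2 (by omega) h2)
    · have hne : (j' : Int) ≠ (k : Int) := by exact_mod_cast hjk
      rw [PySem.Dict.getD_insert_of_ne _ _ _ hne]
      exact hw j' (by omega) hj2

-- B's result is the suffix count of the whole design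
lemma pv_bridge_B (design : String) (patterns : List String)
    (HP : ∀ p ∈ patterns, 0 < p.toList.length) :
    count_ways_to_form_design_alt design patterns = pvF patterns design.toList := by
  show PySem.Dict.getD
      ((PySem.List.pyRange ((design.toList.length : Int) - 1) (-1) (-1)).foldl
        (fun w i => PySem.Dict.insert w i (pvRowB design.toList (pvBagB patterns) w i))
        (PySem.Dict.insert PySem.Dict.empty ((design.toList.length : Nat) : Int) 1)) 0 0
      = pvF patterns design.toList
  have hinit : ∀ j : Nat, design.toList.length ≤ j → j ≤ design.toList.length →
      PySem.Dict.getD (PySem.Dict.insert PySem.Dict.empty ((design.toList.length : Nat) : Int) 1)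
        (j : Int) 0 = pvF patterns (design.toList.drop j) := by
    intro j h1 h2
    have : j = design.toList.length := by omega
    subst this
    rw [PySem.Dict.getD_insert_self, List.drop_length, pvF_nil]
  have h := pvDescent design.toList patterns HP design.toList.length le_rfl
    (PySem.Dict.insert PySem.Dict.empty ((design.toList.length : Nat) : Int) 1) hinit
    0 (Nat.zero_le _)
  rw [List.drop_zero] at h
  exact_mod_cast h

-- ===== VERDICT (by name: the statement is the Claim_ definition above) =====
theorem count_ways_to_form_design_spec : Claim_equal_count_ways_to_form_design := by
  intro design patterns _ hPre
  unfold Spec_count_ways_to_form_design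
  by_cases hd : design = ""
  · have hd' : design.toList = [] := by rw [hd]; rfl
    have hA0 : count_ways_to_form_design design patterns = 1 := by
      rw [pv_bridge_A design patterns, hd']
      rfl
    have hB0 : count_ways_to_form_design_alt design patterns = 1 := by
      show PySem.Dict.getD
          ((PySem.List.pyRange ((design.toList.length : Int) - 1) (-1) (-1)).foldl
            (fun w i => PySem.Dict.insert w i (pvRowB design.toList (pvBagB patterns) w i))
            (PySem.Dict.insert PySem.Dict.empty ((design.toList.length : Nat) : Int) 1)) 0 0 = 1
      rw [hd']
      rw [show ((([] : List Char).length : Int) - 1) = -1 from by norm_num,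
        PySem.List.pyRange_neg_one_eq_nil (by norm_num), List.foldl_nil]
      rfl
    rw [hA0, hB0]
  · have hPre' : "" ∉ patterns := hPre.resolve_right hd
    have HP : ∀ p ∈ patterns, 0 < p.toList.length := by
      intro p hp
      by_contra h
      have hnil : p.toList = [] := List.eq_nil_of_length_eq_zero (by omega)
      have : p = "" := by
        have := congrArg String.ofList hnil
        simpa using this
      exact hPre' (this ▸ hp)
    obtain ⟨hlen, hget⟩ := pvA_spec design.toList patterns HP design.toList.length le_rfl
    rw [pv_bridge_A design patterns, PySem.List.pyGetD_natCast, hget,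
      pvD_eq_pvW design.toList patterns HP _ _ le_rfl,
      pvW_eq_pvF design.toList patterns design.toList.length le_rfl, List.take_length,
      pv_bridge_B design patterns HP]
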